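-- pv_equiv track=rewrite | github.com/HVR88/Limbo-DEV | overlay/bridge/lidarrmetadata/release_filters.py | _release_priority
-- ===== SOURCE A (Python) =====
-- from typing import Any, Dict, Iterable, List, Optional
--
-- def _release_formats(release: Dict[str, Any]) -> Iterable[str]:
--     media_list = release.get("Media")
--     if media_list is None:
--         media_list = release.get("media")
--     for medium in media_list or []:
--         fmt = medium.get("Format") if isinstance(medium, dict) else None
--         if fmt:
--             yield str(fmt).lower()
--
-- def _release_priority(release: Dict[str, Any], tokens: List[str]) -> int:
--     if not tokens:
--         return 0
--     best = len(tokens) + 1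
--     for fmt in _release_formats(release):
--         for idx, token in enumerate(tokens):
--             if token in fmt:
--                 if idx < best:
--                     best = idx
--     return best
-- ===== SOURCE B (Python) =====
-- from typing import Any, Dict, List
--
--
-- def _matches_any_format(release: Dict[str, Any], token: str) -> bool:
--     media = release.get("Media")
--     if media is None:
--         media = release.get("media")
--     for medium in media or []:
--         if isinstance(medium, dict):
--             fmt = medium.get("Format")
--             if fmt and token in str(fmt).lower():
--                 return True
--     return False
--
--
-- def _release_priority(release: Dict[str, Any], tokens: List[str]) -> int:
--     if not tokens:
--         return 0
--     idx = 0
--     for token in tokens: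
--         if _matches_any_format(release, token):
--             return idx
--         idx += 1
--     return len(tokens) + 1
-- ===== Notes on version B (the rewrite author's own statement) =====
-- stated objective: alternative
-- what changed: B never builds a formats list or a min-reduction over (format, token) pairs: it scans tokens in priority order with an explicit index counter and a predicate helper that walks the media entries directly, returning on the first token contained in any format.
import Mathlib
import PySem

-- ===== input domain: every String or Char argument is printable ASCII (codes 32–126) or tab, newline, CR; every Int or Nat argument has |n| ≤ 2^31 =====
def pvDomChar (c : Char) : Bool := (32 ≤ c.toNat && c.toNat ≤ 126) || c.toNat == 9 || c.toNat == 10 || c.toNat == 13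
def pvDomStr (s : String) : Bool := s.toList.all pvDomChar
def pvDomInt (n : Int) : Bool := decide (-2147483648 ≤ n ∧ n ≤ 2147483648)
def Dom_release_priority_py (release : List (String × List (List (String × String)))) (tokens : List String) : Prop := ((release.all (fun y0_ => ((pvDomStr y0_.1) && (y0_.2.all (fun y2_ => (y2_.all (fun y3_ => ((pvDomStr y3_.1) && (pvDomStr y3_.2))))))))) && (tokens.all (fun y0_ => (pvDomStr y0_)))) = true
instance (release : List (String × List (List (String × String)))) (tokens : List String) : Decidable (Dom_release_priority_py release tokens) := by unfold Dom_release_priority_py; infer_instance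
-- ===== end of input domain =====

-- B drops the formats list and the min-reduction over (format, token) pairs entirely:
-- it scans tokens in priority order with an index counter, testing each token against
-- the media entries directly via a predicate helper; objective: alternative decomposition.


-- ===== PORT A =====
-- _release_formats, materialised in yield order (the generator is consumed once by A's loop)
def pyReleaseFormats (release : List (String × List (List (String × String)))) : List String :=
  let mediaList :=
    match PySem.Dict.get? ⟨release⟩ "Media" with
    | some m => some m
    | none => PySem.Dict.get? ⟨release⟩ "media"
  (mediaList.getD []).foldr
    (fun medium acc =>
      match PySem.Dict.get? ⟨medium⟩ "Format" with
      | some fmt => if fmt ≠ "" then PySem.Str.lower fmt :: acc else acc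
      | none => acc) []

def release_priority_py (release : List (String × List (List (String × String)))) (tokens : List String) : Int :=
  if tokens = [] then 0
  else
    (pyReleaseFormats release).foldl
      (fun best fmt =>
        (PySem.List.enumerate tokens).foldl
          (fun best p => if PySem.Str.isIn p.2 fmt && decide (p.1 < best) then p.1 else best)
          best)
      ((tokens.length : Int) + 1)

-- ===== PORT B =====
-- B's predicate helper: does any media entry's Format (truthy, lowercased) contain the token?
def altMatches (release : List (String × List (List (String × String)))) (token : String) : Bool :=
  (match PySem.Dict.get? ⟨release⟩ "Media" with
   | some m => m
   | none => (PySem.Dict.get? ⟨release⟩ "media").getD []).any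
    (fun medium =>
      match PySem.Dict.get? ⟨medium⟩ "Format" with
      | some fmt => fmt ≠ "" && PySem.Str.isIn token (PySem.Str.lower fmt)
      | none => false)

-- B's token loop with the explicit idx counter; `dflt` is `len(tokens) + 1`
def altScan (release : List (String × List (List (String × String)))) (dflt : Int) :
    Int → List String → Int
  | _, [] => dflt
  | idx, t :: rest => if altMatches release t then idx else altScan release dflt (idx + 1) rest

def release_priority_py_alt (release : List (String × List (List (String × String)))) (tokens : List String) : Int :=
  if tokens = [] then 0
  else altScan release ((tokens.length : Int) + 1) 0 tokens

-- ===== PRECONDITION & SPEC =====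
def Spec_release_priority_py (release : List (String × List (List (String × String)))) (tokens : List String) (out : Int) : Prop := out = release_priority_py_alt release tokens
instance (release : List (String × List (List (String × String)))) (tokens : List String) (out : Int) : Decidable (Spec_release_priority_py release tokens out) := by unfold Spec_release_priority_py; infer_instance

-- ===== CLAIM (what is proved, stated in full; the proofs are below) =====
def Claim_equal_release_priority_py : Prop := ∀ (release : List (String × List (List (String × String)))) (tokens : List String), Dom_release_priority_py release tokens → Spec_release_priority_py release tokens (release_priority_py release tokens)

-- ===== LEMMAS AND PROOFS =====

-- B's media predicate agrees with "some snapshotted format contains the token"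
theorem any_eq_foldr_formats (token : String) (ms : List (List (String × String))) :
    ms.any (fun medium =>
      match PySem.Dict.get? ⟨medium⟩ "Format" with
      | some fmt => fmt ≠ "" && PySem.Str.isIn token (PySem.Str.lower fmt)
      | none => false)
    = (ms.foldr
      (fun medium acc =>
        match PySem.Dict.get? ⟨medium⟩ "Format" with
        | some fmt => if fmt ≠ "" then PySem.Str.lower fmt :: acc else acc
        | none => acc) []).any (fun f => PySem.Str.isIn token f) := by
  induction ms with
  | nil => rfl
  | cons m t ih =>
      simp only [List.any_cons, List.foldr_cons, ih]
      cases PySem.Dict.get? ⟨m⟩ "Format" with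
      | none => simp
      | some fmt => by_cases h : fmt = "" <;> simp [h]

theorem altMatches_eq (release : List (String × List (List (String × String)))) (token : String) :
    altMatches release token
      = (pyReleaseFormats release).any (fun f => PySem.Str.isIn token f) := by
  unfold altMatches pyReleaseFormats
  cases PySem.Dict.get? ⟨release⟩ "Media" with
  | some m => simpa using any_eq_foldr_formats token m
  | none =>
      cases PySem.Dict.get? ⟨release⟩ "media" with
      | some m => simpa using any_eq_foldr_formats token m
      | none => simp

-- A's inner loop (one format): the result is min(best, least matching index)
theorem inner_spec (fmt : String) (E : List (Int × String)) (b : Int) :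
    (E.foldl (fun best p => if PySem.Str.isIn p.2 fmt && decide (p.1 < best) then p.1 else best) b) ≤ b
    ∧ (∀ p ∈ E, PySem.Str.isIn p.2 fmt = true →
        (E.foldl (fun best p => if PySem.Str.isIn p.2 fmt && decide (p.1 < best) then p.1 else best) b) ≤ p.1)
    ∧ ((E.foldl (fun best p => if PySem.Str.isIn p.2 fmt && decide (p.1 < best) then p.1 else best) b) = b
        ∨ ∃ p ∈ E, PySem.Str.isIn p.2 fmt = true ∧
          (E.foldl (fun best p => if PySem.Str.isIn p.2 fmt && decide (p.1 < best) then p.1 else best) b) = p.1) := by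
  induction E generalizing b with
  | nil => simp
  | cons p t ih =>
      simp only [List.foldl_cons]
      set b' := if PySem.Str.isIn p.2 fmt && decide (p.1 < b) then p.1 else b with hb'
      obtain ⟨ih1, ih2, ih3⟩ := ih b'
      have hb'le : b' ≤ b := by
        rw [hb']; split_ifs with h
        · exact le_of_lt (of_decide_eq_true (Bool.and_eq_true .. ▸ h).2)
        · exact le_rfl
      refine ⟨le_trans ih1 hb'le, ?_, ?_⟩
      · intro q hq hmq
        rcases List.mem_cons.mp hq with rfl | hq
        · by_cases hlt : q.1 < b
          · have hcond : (PySem.Str.isIn q.2 fmt && decide (q.1 < b)) = true := by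
              rw [Bool.and_eq_true]
              exact ⟨hmq, decide_eq_true hlt⟩
            have hb'eq : b' = q.1 := by rw [hb', if_pos hcond]
            exact hb'eq ▸ ih1
          · exact le_trans (le_trans ih1 hb'le) (not_lt.mp hlt)
        · exact ih2 q hq hmq
      · rcases ih3 with h | ⟨q, hq, hmq, hres⟩
        · by_cases hc : (PySem.Str.isIn p.2 fmt && decide (p.1 < b)) = true
          · have hb'eq : b' = p.1 := by rw [hb', if_pos hc]
            rcases Bool.and_eq_true .. ▸ hc with ⟨hmf, _⟩
            exact Or.inr ⟨p, List.mem_cons_self, hmf, by rw [h, hb'eq]⟩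
          · have hb'eq : b' = b := by rw [hb', if_neg hc]
            exact Or.inl (by rw [h, hb'eq])
        · exact Or.inr ⟨q, List.mem_cons_of_mem _ hq, hmq, hres⟩

-- A's outer loop: bound, lower-bound on every matching index, and provenance of the result
theorem outer_spec (formats : List String) (E : List (Int × String)) (b : Int) :
    (formats.foldl (fun best fmt =>
        E.foldl (fun best p => if PySem.Str.isIn p.2 fmt && decide (p.1 < best) then p.1 else best) best) b) ≤ b
    ∧ (∀ fmt ∈ formats, ∀ p ∈ E, PySem.Str.isIn p.2 fmt = true →
        (formats.foldl (fun best fmt =>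
          E.foldl (fun best p => if PySem.Str.isIn p.2 fmt && decide (p.1 < best) then p.1 else best) best) b) ≤ p.1)
    ∧ ((formats.foldl (fun best fmt =>
          E.foldl (fun best p => if PySem.Str.isIn p.2 fmt && decide (p.1 < best) then p.1 else best) best) b) = b
        ∨ ∃ fmt ∈ formats, ∃ p ∈ E, PySem.Str.isIn p.2 fmt = true ∧
          (formats.foldl (fun best fmt =>
            E.foldl (fun best p => if PySem.Str.isIn p.2 fmt && decide (p.1 < best) then p.1 else best) best) b) = p.1) := by
  induction formats generalizing b with
  | nil => simp
  | cons fmt fs ih =>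
      simp only [List.foldl_cons]
      set b' := E.foldl (fun best p => if PySem.Str.isIn p.2 fmt && decide (p.1 < best) then p.1 else best) b with hb'
      obtain ⟨i1, i2, i3⟩ := inner_spec fmt E b
      obtain ⟨o1, o2, o3⟩ := ih b'
      refine ⟨le_trans o1 i1, ?_, ?_⟩
      · intro g hg q hq hmq
        rcases List.mem_cons.mp hg with rfl | hg
        · exact le_trans o1 (i2 q hq hmq)
        · exact o2 g hg q hq hmq
      · rcases o3 with h | ⟨g, hg, q, hq, hmq, hres⟩
        · rw [h]
          rcases i3 with h' | ⟨q, hq, hmq, hres⟩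
          · exact Or.inl h'
          · exact Or.inr ⟨fmt, List.mem_cons_self, q, hq, hmq, hres⟩
        · exact Or.inr ⟨g, List.mem_cons_of_mem _ hg, q, hq, hmq, hres⟩

-- B's counter loop: either no token matches and the default is returned, or the result is
-- idx plus the position of the FIRST matching token
theorem altScan_spec (release : List (String × List (List (String × String)))) (d : Int) :
    ∀ (ts : List String) (i : Int),
    (altScan release d i ts = d ∧ ∀ t ∈ ts, altMatches release t = false)
    ∨ (∃ (k : Nat) (h : k < ts.length), altMatches release ts[k] = true
        ∧ altScan release d i ts = i + k
        ∧ ∀ (j : Nat) (hj : j < k), altMatches release (ts[j]'(by omega)) = false) := by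
  intro ts
  induction ts with
  | nil => intro i; exact Or.inl ⟨rfl, by simp⟩
  | cons t rest ih =>
      intro i
      by_cases hm : altMatches release t = true
      · exact Or.inr ⟨0, by simp, by simpa using hm, by simp [altScan, hm], by omega⟩
      · have hm' : altMatches release t = false := by simpa using hm
        have hstep : altScan release d i (t :: rest) = altScan release d (i + 1) rest := by
          simp [altScan, hm']
        rcases ih (i + 1) with ⟨h1, h2⟩ | ⟨k, hk, hmk, hres, hmin⟩
        · refine Or.inl ⟨hstep ▸ h1, ?_⟩
          intro u hu
          rcases List.mem_cons.mp hu with rfl | hu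
          · exact hm'
          · exact h2 u hu
        · refine Or.inr ⟨k + 1, by simpa using Nat.succ_lt_succ hk, by simpa using hmk,
            by rw [hstep, hres]; push_cast; ring, ?_⟩
          intro j hj
          cases j with
          | zero => simpa using hm'
          | succ j => simpa using hmin j (by omega)

theorem enumerate_fst_lt (tokens : List String) :
    ∀ p ∈ PySem.List.enumerate tokens, p.1 < (tokens.length : Int) + 1 := by
  intro p hp
  rcases (PySem.List.mem_enumerate_iff tokens 0 p).mp hp with ⟨k, hk, rfl⟩
  have hk' : (k : Int) < (tokens.length : Int) := by exact_mod_cast hk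
  simp only [zero_add]
  omega

-- ===== VERDICT (by name: the statement is the Claim_ definition above) =====
theorem release_priority_py_spec : Claim_equal_release_priority_py := by
  intro release tokens _
  unfold Spec_release_priority_py release_priority_py release_priority_py_alt
  by_cases ht : tokens = []
  · simp [ht]
  · simp only [ht, if_false]
    set formats := pyReleaseFormats release with hf
    set E := PySem.List.enumerate tokens with hE
    set b₀ : Int := (tokens.length : Int) + 1 with hb₀
    have hub : ∀ p ∈ E, p.1 < b₀ := enumerate_fst_lt tokens
    obtain ⟨o1, o2, o3⟩ := outer_spec formats E b₀
    rcases altScan_spec release b₀ tokens 0 with ⟨h1, h2⟩ | ⟨k, hk, hmk, hres, hmin⟩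
    · -- no token matches: A's result must be b₀
      rw [h1]
      rcases o3 with h | ⟨g, hg, q, hq, hmq, hres⟩
      · exact h
      · rcases (PySem.List.mem_enumerate_iff tokens 0 q).mp hq with ⟨j, hj, rfl⟩
        have := h2 tokens[j] (List.getElem_mem hj)
        rw [altMatches_eq, List.any_eq_false] at this
        exact absurd hmq (by simpa using this g hg)
    · -- first matching token at position k: A's result is exactly k
      rw [hres]
      have hkE : ((k : Int), tokens[k]) ∈ E := by
        rw [hE, PySem.List.mem_enumerate_iff]
        exact ⟨k, hk, by simp⟩
      have hle : (formats.foldl (fun best fmt =>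
          E.foldl (fun best p => if PySem.Str.isIn p.2 fmt && decide (p.1 < best) then p.1 else best) best) b₀) ≤ (k : Int) := by
        rw [altMatches_eq] at hmk
        rcases List.any_eq_true.mp hmk with ⟨g, hg, hmg⟩
        exact o2 g hg ((k : Int), tokens[k]) hkE (by simpa using hmg)
      rcases o3 with h | ⟨g, hg, q, hq, hmq, hres'⟩
      · exfalso
        have : b₀ ≤ (k : Int) := h ▸ hle
        have : (k : Int) < b₀ := hub _ hkE
        omega
      · -- result is some matching index q.1 = j; minimality of k gives j ≥ k, hle gives j ≤ k
        rcases (PySem.List.mem_enumerate_iff tokens 0 q).mp hq with ⟨j, hj, rfl⟩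
        simp only [zero_add] at hres' hmq
        have hjm : altMatches release tokens[j] = true := by
          rw [altMatches_eq]
          exact List.any_eq_true.mpr ⟨g, hg, by simpa using hmq⟩
        have hkj : ¬ j < k := fun hlt => by
          have := hmin j hlt
          rw [this] at hjm
          exact Bool.false_ne_true hjm
        rw [hres'] at hle ⊢
        have : (k : Int) ≤ (j : Int) := by exact_mod_cast Nat.le_of_not_lt hkj
        omega
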